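-- pv_equiv track=rewrite | github.com/EthanTon/Curve_Generation_Tool | src/main/util/shapeUtil.py | step_line
-- ===== SOURCE A (Python) =====
-- def step_line(x0, y0, x1, y1):
--     """Generates points on a line where every pixel touches by a face (4-connectivity)"""
--     points = []
--     dx = abs(x1 - x0)
--     dy = abs(y1 - y0)
--     sx = 1 if x0 < x1 else -1
--     sy = 1 if y0 < y1 else -1
--     err = dx - dy
--
--     while True:
--         points.append((x0, y0))
--
--         if x0 == x1 and y0 == y1:
--             break
--
--         e2 = 2 * err
--
--         # KEY MODIFICATION:
--         # If both conditions are met, a diagonal jump is about to happen.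
--         # We insert an intermediate pixel to ensure face-to-face contact.
--         if e2 > -dy and e2 < dx:
--             # You can choose to move in X or Y first.
--             # Moving in X first is the standard convention here.
--             points.append((x0 + sx, y0))
--
--         if e2 > -dy:
--             err -= dy
--             x0 += sx
--
--         if e2 < dx:
--             err += dx
--             y0 += sy
--
--     return points
-- ===== SOURCE B (Python) =====
-- def step_line(x0, y0, x1, y1):
--     """Two-phase: plain 8-connected Bresenham base walk, then a zip-based
--     densification pass inserting the corner pixel of every diagonal step."""
--     dx = abs(x1 - x0)
--     dy = abs(y1 - y0)
--     sx = 1 if x0 < x1 else -1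
--     sy = 1 if y0 < y1 else -1
--     # phase 1: plain Bresenham polyline (no corner insertion)
--     base = []
--     x, y, err = x0, y0, dx - dy
--     while (x, y) != (x1, y1):
--         base.append((x, y))
--         e2 = 2 * err
--         if e2 > -dy:
--             err -= dy
--             x += sx
--         if e2 < dx:
--             err += dx
--             y += sy
--     base.append((x, y))
--     # phase 2: densify — walk consecutive pairs, insert (b.x, a.y) on diagonals
--     out = []
--     for a, b in zip(base, base[1:]):
--         out.append(a)
--         if a[0] != b[0] and a[1] != b[1]:
--             out.append((b[0], a[1]))
--     out.append(base[-1])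
--     return out
-- ===== Notes on version B (the rewrite author's own statement) =====
-- stated objective: alternative
-- what changed: A's single fused loop that inserts the corner pixel mid-iteration is replaced by two separate phases: a plain 8-connected Bresenham walk producing the base polyline, then a zip-over-consecutive-pairs pass that inserts the corner (b.x, a.y) between each diagonally adjacent pair.
import Mathlib
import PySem

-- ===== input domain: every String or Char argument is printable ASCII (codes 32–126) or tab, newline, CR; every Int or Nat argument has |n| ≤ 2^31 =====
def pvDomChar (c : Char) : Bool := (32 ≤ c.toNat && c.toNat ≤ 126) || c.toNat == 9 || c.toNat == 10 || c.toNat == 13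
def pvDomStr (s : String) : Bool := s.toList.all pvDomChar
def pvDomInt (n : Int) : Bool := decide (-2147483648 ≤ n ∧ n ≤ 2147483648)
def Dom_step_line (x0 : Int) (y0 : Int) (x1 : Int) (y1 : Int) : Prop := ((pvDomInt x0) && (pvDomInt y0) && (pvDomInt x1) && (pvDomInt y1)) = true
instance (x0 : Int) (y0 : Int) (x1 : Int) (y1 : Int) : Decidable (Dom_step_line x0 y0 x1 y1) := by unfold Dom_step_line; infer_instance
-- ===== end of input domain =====

-- B replaces A's fused 4-connected Bresenham loop with two phases (a plain 8-connected
-- Bresenham walk, then a zip-over-pairs densification inserting each diagonal's corner);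
-- same return value, objective: alternative decomposition.

-- ===== PORT A =====
-- A's `while True` loop; `points.append` becomes consing onto the accumulator `acc`
-- (reversed at exit), and the loop is fuel-guarded: fuel dx+dy+1 always exceeds the
-- iteration count of the Python loop on any terminating input (fuel 0 ends the loop).
def stepLineLoopA (dx dy sx sy x1 y1 : Int) : Nat → Int → Int → Int → List (Int × Int) → List (Int × Int)
  | 0, x, y, _, acc => ((x, y) :: acc).reverse
  | fuel+1, x, y, err, acc =>
    if x = x1 ∧ y = y1 then ((x, y) :: acc).reverse
    else
      stepLineLoopA dx dy sx sy x1 y1 fuel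
        (if 2 * err > -dy then x + sx else x)
        (if 2 * err < dx then y + sy else y)
        (if 2 * err < dx then (if 2 * err > -dy then err - dy else err) + dx
         else (if 2 * err > -dy then err - dy else err))
        (if 2 * err > -dy ∧ 2 * err < dx then (x + sx, y) :: (x, y) :: acc else (x, y) :: acc)

def step_line (x0 : Int) (y0 : Int) (x1 : Int) (y1 : Int) : List (Int × Int) :=
  let dx := |x1 - x0|
  let dy := |y1 - y0|
  let sx : Int := if x0 < x1 then 1 else -1
  let sy : Int := if y0 < y1 then 1 else -1
  stepLineLoopA dx dy sx sy x1 y1 (dx + dy + 1).toNat x0 y0 (dx - dy) []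

-- ===== PORT B =====
-- one Bresenham step of B's phase-1 loop body: (x, y, err) ↦ (x', y', err')
def bstep (dx dy sx sy x y err : Int) : Int × Int × Int :=
  let e2 := 2 * err
  let p1 := if e2 > -dy then (x + sx, err - dy) else (x, err)
  let p2 := if e2 < dx then (p1.2 + dx, y + sy) else (p1.2, y)
  (p1.1, p2.2, p2.1)

-- phase 1: B's `while (x,y) != (x1,y1)` loop, building the base list front-to-back
-- (same dx+dy+1 fuel guard as A's port; fuel 0 ends the loop)
def walkB (dx dy sx sy x1 y1 : Int) : Nat → Int → Int → Int → List (Int × Int)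
  | 0, x, y, _ => [(x, y)]
  | fuel+1, x, y, err =>
    if x = x1 ∧ y = y1 then [(x, y)]
    else
      let s := bstep dx dy sx sy x y err
      (x, y) :: walkB dx dy sx sy x1 y1 fuel s.1 s.2.1 s.2.2

-- phase 2: the `for a, b in zip(base, base[1:])` pass plus the trailing `base[-1]`;
-- `base` is never empty, so `base[-1]` is ported as getLast? matched to its value
def densifyZip (base : List (Int × Int)) : List (Int × Int) :=
  ((base.zip base.tail).flatMap fun ab =>
      if ab.1.1 ≠ ab.2.1 ∧ ab.1.2 ≠ ab.2.2 then [ab.1, (ab.2.1, ab.1.2)] else [ab.1])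
    ++ (match base.getLast? with | some p => [p] | none => [])

def step_line_alt (x0 : Int) (y0 : Int) (x1 : Int) (y1 : Int) : List (Int × Int) :=
  let dx := |x1 - x0|
  let dy := |y1 - y0|
  let sx : Int := if x0 < x1 then 1 else -1
  let sy : Int := if y0 < y1 then 1 else -1
  densifyZip (walkB dx dy sx sy x1 y1 (dx + dy + 1).toNat x0 y0 (dx - dy))

-- ===== PRECONDITION & SPEC =====
def Spec_step_line (x0 : Int) (y0 : Int) (x1 : Int) (y1 : Int) (out : List (Int × Int)) : Prop := out = step_line_alt x0 y0 x1 y1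
instance (x0 : Int) (y0 : Int) (x1 : Int) (y1 : Int) (out : List (Int × Int)) : Decidable (Spec_step_line x0 y0 x1 y1 out) := by unfold Spec_step_line; infer_instance

-- ===== CLAIM (what is proved, stated in full; the proofs are below) =====
def Claim_equal_step_line : Prop := ∀ (x0 : Int) (y0 : Int) (x1 : Int) (y1 : Int), Dom_step_line x0 y0 x1 y1 → Spec_step_line x0 y0 x1 y1 (step_line x0 y0 x1 y1)

-- ===== LEMMAS AND PROOFS =====

-- pure (non-accumulator) version of A's loop, used only in the proofs
def loopAP (dx dy sx sy x1 y1 : Int) : Nat → Int → Int → Int → List (Int × Int)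
  | 0, x, y, _ => [(x, y)]
  | fuel+1, x, y, err =>
    if x = x1 ∧ y = y1 then [(x, y)]
    else
      (x, y) :: (if 2 * err > -dy ∧ 2 * err < dx then [(x + sx, y)] else []) ++
        loopAP dx dy sx sy x1 y1 fuel
          (if 2 * err > -dy then x + sx else x)
          (if 2 * err < dx then y + sy else y)
          (if 2 * err < dx then (if 2 * err > -dy then err - dy else err) + dx
           else (if 2 * err > -dy then err - dy else err))

theorem loopA_eq_loopAP (dx dy sx sy x1 y1 : Int) (fuel : Nat) :
    ∀ x y err acc, stepLineLoopA dx dy sx sy x1 y1 fuel x y err acc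
      = acc.reverse ++ loopAP dx dy sx sy x1 y1 fuel x y err := by
  induction fuel with
  | zero => intro x y err acc; simp [stepLineLoopA, loopAP]
  | succ n ih =>
    intro x y err acc
    rw [stepLineLoopA, loopAP]
    by_cases h : x = x1 ∧ y = y1
    · simp [h]
    · simp only [h, if_false]
      rw [ih]
      by_cases hd : 2 * err > -dy ∧ 2 * err < dx <;> simp [hd]

theorem bstep_eq (dx dy sx sy x y err : Int) :
    bstep dx dy sx sy x y err
      = ((if 2 * err > -dy then x + sx else x),
         (if 2 * err < dx then y + sy else y),
         (if 2 * err < dx then (if 2 * err > -dy then err - dy else err) + dx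
          else (if 2 * err > -dy then err - dy else err))) := by
  by_cases h1 : 2 * err > -dy <;> by_cases h2 : 2 * err < dx <;> simp [bstep, h1, h2]

theorem walkB_head (dx dy sx sy x1 y1 : Int) (fuel : Nat) (x y err : Int) :
    ∃ t, walkB dx dy sx sy x1 y1 fuel x y err = (x, y) :: t := by
  cases fuel with
  | zero => exact ⟨[], rfl⟩
  | succ n =>
    unfold walkB
    by_cases h : x = x1 ∧ y = y1
    · simp [h]
    · simp [h]

theorem densifyZip_single (p : Int × Int) : densifyZip [p] = [p] := by
  simp [densifyZip]

theorem densifyZip_cons (p q : Int × Int) (r : List (Int × Int)) :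
    densifyZip (p :: q :: r)
      = (p :: (if p.1 ≠ q.1 ∧ p.2 ≠ q.2 then [(q.1, p.2)] else [])) ++ densifyZip (q :: r) := by
  by_cases hd : p.1 ≠ q.1 ∧ p.2 ≠ q.2 <;> simp [densifyZip, hd]

theorem corner_eq (x y sx sy e2 dx dy : Int)
    (hsx : sx = 1 ∨ sx = -1) (hsy : sy = 1 ∨ sy = -1) :
    (if e2 > -dy ∧ e2 < dx then [((x + sx : Int), y)] else [])
      = (if x ≠ (if e2 > -dy then x + sx else x) ∧ y ≠ (if e2 < dx then y + sy else y)
          then [((if e2 > -dy then x + sx else x), y)] else []) := by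
  have hx : x ≠ x + sx := by rcases hsx with rfl | rfl <;> omega
  have hy : y ≠ y + sy := by rcases hsy with rfl | rfl <;> omega
  by_cases h1 : e2 > -dy <;> by_cases h2 : e2 < dx <;>
    simp [h1, h2, hx, hy]

theorem loopAP_eq_densify_walkB (dx dy sx sy x1 y1 : Int)
    (hsx : sx = 1 ∨ sx = -1) (hsy : sy = 1 ∨ sy = -1) (fuel : Nat) :
    ∀ x y err, loopAP dx dy sx sy x1 y1 fuel x y err
      = densifyZip (walkB dx dy sx sy x1 y1 fuel x y err) := by
  induction fuel with
  | zero => intro x y err; simp [loopAP, walkB, densifyZip_single]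
  | succ n ih =>
    intro x y err
    rw [loopAP, walkB]
    by_cases h : x = x1 ∧ y = y1
    · simp [h, densifyZip_single]
    · simp only [h, if_false, bstep_eq]
      obtain ⟨t, ht⟩ := walkB_head dx dy sx sy x1 y1 n
        (if 2 * err > -dy then x + sx else x)
        (if 2 * err < dx then y + sy else y)
        (if 2 * err < dx then (if 2 * err > -dy then err - dy else err) + dx
         else (if 2 * err > -dy then err - dy else err))
      rw [ih, ht, densifyZip_cons, ← ht]
      rw [corner_eq x y sx sy (2 * err) dx dy hsx hsy]

-- ===== VERDICT (by name: the statement is the Claim_ definition above) =====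
theorem step_line_spec : Claim_equal_step_line := by
  intro x0 y0 x1 y1 _
  show step_line x0 y0 x1 y1 = step_line_alt x0 y0 x1 y1
  simp only [step_line, step_line_alt]
  rw [loopA_eq_loopAP]
  simp only [List.reverse_nil, List.nil_append]
  apply loopAP_eq_densify_walkB
  · by_cases h : x0 < x1 <;> simp [h]
  · by_cases h : y0 < y1 <;> simp [h]
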